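-- pv_equiv track=rewrite | github.com/flash1293/squeezed-signals | lib/encoders.py | delta_encode_timestamps
-- ===== SOURCE A (Python) =====
-- from typing import List, Tuple, Union
--
-- def delta_encode_timestamps(timestamps: List[int]) -> Tuple[int, int, List[int]]:
--     """
--     Double-delta encode timestamps.
--
--     Args:
--         timestamps: List of timestamps (integers)
--
--     Returns:
--         Tuple of (initial_timestamp, first_delta, double_deltas)
--     """
--     if len(timestamps) < 2:
--         return timestamps[0] if timestamps else 0, 0, []
--
--     if len(timestamps) == 2:
--         return timestamps[0], timestamps[1] - timestamps[0], []
--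
--     initial_timestamp = timestamps[0]
--     first_delta = timestamps[1] - timestamps[0]
--
--     deltas = []
--     for i in range(1, len(timestamps)):
--         deltas.append(timestamps[i] - timestamps[i-1])
--
--     double_deltas = []
--     for i in range(1, len(deltas)):
--         double_deltas.append(deltas[i] - deltas[i-1])
--
--     return initial_timestamp, first_delta, double_deltas
-- ===== SOURCE B (Python) =====
-- def delta_encode_timestamps(timestamps):
--     """
--     Double-delta encode timestamps in one pass, never building the
--     intermediate deltas list: (t[i]-t[i-1]) - (t[i-1]-t[i-2]) = t[i] - 2*t[i-1] + t[i-2].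
--     """
--     if len(timestamps) < 2:
--         return (timestamps[0] if timestamps else 0), 0, []
--     if len(timestamps) == 2:
--         return timestamps[0], timestamps[1] - timestamps[0], []
--     double_deltas = [c - 2 * b + a for a, b, c in
--                      zip(timestamps, timestamps[1:], timestamps[2:])]
--     return timestamps[0], timestamps[1] - timestamps[0], double_deltas
-- ===== Notes on version B (the rewrite author's own statement) =====
-- stated objective: simpler
-- what changed: B computes each double delta directly as t[i]-2*t[i-1]+t[i-2] in a single zip over three offset views, never building the intermediate deltas list that A constructs in a separate first pass.
import Mathlib
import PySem

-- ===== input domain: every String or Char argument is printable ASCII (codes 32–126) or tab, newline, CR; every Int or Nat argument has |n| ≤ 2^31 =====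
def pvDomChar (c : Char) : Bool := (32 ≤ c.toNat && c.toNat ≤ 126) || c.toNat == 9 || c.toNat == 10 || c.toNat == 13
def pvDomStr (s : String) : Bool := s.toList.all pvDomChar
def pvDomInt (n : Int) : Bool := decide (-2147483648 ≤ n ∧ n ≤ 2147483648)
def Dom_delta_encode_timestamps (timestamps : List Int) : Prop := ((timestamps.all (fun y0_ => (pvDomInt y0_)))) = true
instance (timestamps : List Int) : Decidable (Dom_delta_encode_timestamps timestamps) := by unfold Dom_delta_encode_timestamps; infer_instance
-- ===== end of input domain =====

-- B computes each double delta directly as t[i]-2*t[i-1]+t[i-2] in one pass over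
-- three offset views, never building A's intermediate deltas list (objective: simpler).


-- ===== PORT A =====
def delta_encode_timestamps (timestamps : List Int) : Int × Int × List Int :=
  if (timestamps.length : Int) < 2 then
    ((if timestamps ≠ [] then PySem.List.pyGetD timestamps 0 0 else 0), 0, [])
  else if (timestamps.length : Int) == 2 then
    (PySem.List.pyGetD timestamps 0 0,
     PySem.List.pyGetD timestamps 1 0 - PySem.List.pyGetD timestamps 0 0, [])
  else
    let initial_timestamp := PySem.List.pyGetD timestamps 0 0
    let first_delta := PySem.List.pyGetD timestamps 1 0 - PySem.List.pyGetD timestamps 0 0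
    let deltas := (PySem.List.pyRange 1 (timestamps.length : Int) 1).foldl
      (fun acc i => acc ++ [PySem.List.pyGetD timestamps i 0 - PySem.List.pyGetD timestamps (i-1) 0]) []
    let double_deltas := (PySem.List.pyRange 1 (deltas.length : Int) 1).foldl
      (fun acc i => acc ++ [PySem.List.pyGetD deltas i 0 - PySem.List.pyGetD deltas (i-1) 0]) []
    (initial_timestamp, first_delta, double_deltas)

-- ===== PORT B =====
-- the zip-of-three-offset-views comprehension of Source B, as recursion over consecutive triples
def ddTriples : List Int → List Int
  | a :: b :: c :: rest => (c - 2*b + a) :: ddTriples (b :: c :: rest)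
  | _ => []

def delta_encode_timestamps_alt (timestamps : List Int) : Int × Int × List Int :=
  match timestamps with
  | [] => (0, 0, [])
  | [a] => (a, 0, [])
  | [a, b] => (a, b - a, [])
  | a :: b :: rest => (a, b - a, ddTriples (a :: b :: rest))

-- ===== PRECONDITION & SPEC =====
def Spec_delta_encode_timestamps (timestamps : List Int) (out : Int × Int × List Int) : Prop := out = delta_encode_timestamps_alt timestamps
instance (timestamps : List Int) (out : Int × Int × List Int) : Decidable (Spec_delta_encode_timestamps timestamps out) := by unfold Spec_delta_encode_timestamps; infer_instance

-- ===== CLAIM (what is proved, stated in full; the proofs are below) =====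
def Claim_equal_delta_encode_timestamps : Prop := ∀ (timestamps : List Int), Dom_delta_encode_timestamps timestamps → Spec_delta_encode_timestamps timestamps (delta_encode_timestamps timestamps)

-- ===== LEMMAS AND PROOFS =====

-- successive pairwise differences, the common characterisation of both programs' loops
def pairDeltas : List Int → List Int
  | a :: b :: rest => (b - a) :: pairDeltas (b :: rest)
  | _ => []

theorem pairDeltas_length (xs : List Int) : (pairDeltas xs).length = xs.length - 1 := by
  match xs with
  | [] => rfl
  | [_] => rfl
  | a :: b :: rest =>
    simp [pairDeltas, pairDeltas_length (b :: rest)]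

theorem pairDeltas_getElem (xs : List Int) (k : Nat) (hk : k < (pairDeltas xs).length) :
    (pairDeltas xs)[k] =
      xs[k+1]'(by have := pairDeltas_length xs; omega) - xs[k]'(by have := pairDeltas_length xs; omega) := by
  match xs, k with
  | a :: b :: rest, 0 => simp [pairDeltas]
  | a :: b :: rest, k+1 =>
    have hk' : k < (pairDeltas (b :: rest)).length := by
      simpa [pairDeltas] using hk
    simp [pairDeltas, pairDeltas_getElem (b :: rest) k hk']

-- A's index loop builds exactly pairDeltas
theorem loop_eq_pairDeltas (xs : List Int) :
    (PySem.List.pyRange 1 (xs.length : Int) 1).foldl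
      (fun acc i => acc ++ [PySem.List.pyGetD xs i 0 - PySem.List.pyGetD xs (i-1) 0]) []
    = pairDeltas xs := by
  rw [PySem.List.foldl_append_singleton_eq_map]
  apply List.ext_getElem
  · simp [PySem.List.length_pyRange_one, pairDeltas_length]
  · intro k h1 h2
    have hlen : k < ((xs.length : Int) - 1).toNat := by
      simpa [PySem.List.length_pyRange_one] using h1
    have hx : k + 1 < xs.length := by omega
    simp only [List.nil_append]
    rw [List.getElem_map, PySem.List.getElem_pyRange_one, pairDeltas_getElem xs k h2]
    have h1' : PySem.List.pyGetD xs (1 + (k : Int)) 0 = xs[k+1] := by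
      rw [show (1 + (k : Int)) = ((k+1 : Nat) : Int) by omega,
        PySem.List.pyGetD_natCast, List.getD_eq_getElem _ _ hx]
    have h2' : PySem.List.pyGetD xs (1 + (k : Int) - 1) 0 = xs[k] := by
      rw [show (1 + (k : Int) - 1) = ((k : Nat) : Int) by omega,
        PySem.List.pyGetD_natCast, List.getD_eq_getElem _ _ (by omega : k < xs.length)]
    rw [h1', h2']

theorem ddTriples_eq (xs : List Int) : ddTriples xs = pairDeltas (pairDeltas xs) := by
  match xs with
  | [] => rfl
  | [_] => rfl
  | [_, _] => rfl
  | a :: b :: c :: rest =>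
    simp only [ddTriples]
    rw [ddTriples_eq (b :: c :: rest)]
    show _ = ((c - b) - (b - a)) :: pairDeltas ((c - b) :: pairDeltas (c :: rest))
    congr 1
    ring

-- ===== VERDICT (by name: the statement is the Claim_ definition above) =====
theorem delta_encode_timestamps_spec : Claim_equal_delta_encode_timestamps := by
  unfold Claim_equal_delta_encode_timestamps
  intro t _
  unfold Spec_delta_encode_timestamps
  match t with
  | [] => rfl
  | [a] => rfl
  | [a, b] => rfl
  | a :: b :: c :: rest =>
    show delta_encode_timestamps (a :: b :: c :: rest) = _
    unfold delta_encode_timestamps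
    rw [if_neg (by simp; omega), if_neg (by simp; omega)]
    simp only [loop_eq_pairDeltas, loop_eq_pairDeltas (pairDeltas (a :: b :: c :: rest))]
    simp [delta_encode_timestamps_alt, ddTriples_eq, PySem.List.pyGetD, PySem.List.pyGet?, PySem.List.pyIdx?,
      show (0:Int) ≤ (rest.length:Int) + 1 + 1 by positivity,
      show (0:Int) ≤ (rest.length:Int) + 1 by positivity]
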